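-- pv_equiv track=rewrite | github.com/VUzan-bio/DNA-Bacteria-JEPA | scripts/03_visualize_embeddings.py | sort_by_phylum
-- ===== SOURCE A (Python) =====
-- SPECIES_METADATA = {
--     "Escherichia coli K-12":       ("g-Proteobacteria",   50.8),
--     "Escherichia coli 536":        ("g-Proteobacteria",   50.5),
--     "Pseudomonas putida":          ("g-Proteobacteria",   61.5),
--     "Acinetobacter baumannii":     ("g-Proteobacteria",   39.0),
--     "Vibrio cholerae":             ("g-Proteobacteria",   47.5),
--     "Rhodobacter sphaeroides":     ("a-Proteobacteria",   68.8),
--     "Rhodopseudomonas palustris":  ("a-Proteobacteria",   65.0),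
--     "Campylobacter jejuni":        ("e-Proteobacteria",   30.5),
--     "Helicobacter pylori":         ("e-Proteobacteria",   38.9),
--     "Bacillus subtilis":           ("Firmicutes",          43.5),
--     "Staphylococcus aureus":       ("Firmicutes",          32.9),
--     "Lactobacillus acidophilus":    ("Firmicutes",          34.7),
--     "Listeria monocytogenes":      ("Firmicutes",          38.0),
--     "Enterococcus faecalis":       ("Firmicutes",          37.4),
--     "Clostridium acetobutylicum":  ("Firmicutes",          30.9),
--     "Mycobacterium tuberculosis":  ("Actinobacteria",      65.6),
--     "Streptomyces coelicolor":     ("Actinobacteria",      72.1),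
--     "Deinococcus radiodurans":     ("Deinococcota",        67.0),
--     "Thermus thermophilus":        ("Deinococcota",        69.4),
--     "Mycoplasma genitalium":       ("Tenericutes",         31.7),
--     "Borrelia burgdorferi":        ("Spirochaetes",        28.6),
-- }
--
-- PHYLUM_ORDER = [
--     "g-Proteobacteria", "a-Proteobacteria", "e-Proteobacteria",
--     "Firmicutes", "Actinobacteria", "Deinococcota",
--     "Tenericutes", "Spirochaetes", "Other",
-- ]
--
-- def get_phylum(name):
--     if name in SPECIES_METADATA: return SPECIES_METADATA[name][0]
--     genus = name.split()[0] if " " in name else name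
--     for k, (p, _) in SPECIES_METADATA.items():
--         if k.startswith(genus): return p
--     return "Other"
--
-- def sort_by_phylum(unique_ids, resolved):
--     items = []
--     for gid in unique_ids:
--         nm = resolved[gid] if gid < len(resolved) else f"Genome {gid}"
--         items.append((gid, nm, get_phylum(nm)))
--     items.sort(key=lambda x: (
--         PHYLUM_ORDER.index(x[2]) if x[2] in PHYLUM_ORDER else len(PHYLUM_ORDER), x[1]))
--     return items
-- ===== SOURCE B (Python) =====
-- PHYLA_TABLE = [
--     ("g-Proteobacteria", ["Escherichia coli K-12", "Escherichia coli 536",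
--                           "Pseudomonas putida", "Acinetobacter baumannii", "Vibrio cholerae"]),
--     ("a-Proteobacteria", ["Rhodobacter sphaeroides", "Rhodopseudomonas palustris"]),
--     ("e-Proteobacteria", ["Campylobacter jejuni", "Helicobacter pylori"]),
--     ("Firmicutes",       ["Bacillus subtilis", "Staphylococcus aureus", "Lactobacillus acidophilus",
--                           "Listeria monocytogenes", "Enterococcus faecalis", "Clostridium acetobutylicum"]),
--     ("Actinobacteria",   ["Mycobacterium tuberculosis", "Streptomyces coelicolor"]),
--     ("Deinococcota",     ["Deinococcus radiodurans", "Thermus thermophilus"]),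
--     ("Tenericutes",      ["Mycoplasma genitalium"]),
--     ("Spirochaetes",     ["Borrelia burgdorferi"]),
--     ("Other",            []),
-- ]
--
-- def phylum_of(name):
--     for ph, names in PHYLA_TABLE:
--         if name in names:
--             return ph
--     genus = name.split()[0] if " " in name else name
--     for ph, names in PHYLA_TABLE:
--         if any(k.startswith(genus) for k in names):
--             return ph
--     return "Other"
--
-- def sort_by_phylum(unique_ids, resolved):
--     # Staged passes: classify once, then emit one name-sorted slice per phylum group,
--     # groups already listed in display order (PHYLA_TABLE flattens to A's dict, in order).
--     def label(gid):
--         return resolved[gid] if gid < len(resolved) else f"Genome {gid}"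
--     named = [(gid, label(gid)) for gid in unique_ids]
--     triples = [(gid, nm, phylum_of(nm)) for gid, nm in named]
--     out = []
--     for ph, _ in PHYLA_TABLE:
--         out += sorted((t for t in triples if t[2] == ph), key=lambda t: t[1])
--     return out
-- ===== Notes on version B (the rewrite author's own statement) =====
-- stated objective: alternative
-- what changed: Replaces the single sort under a composite (phylum-rank, name) key by staged passes over a phylum-grouped species table: classify each id once against the grouped table (no rank arithmetic), then emit one name-sorted slice per phylum group in display order.
import Mathlib
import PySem

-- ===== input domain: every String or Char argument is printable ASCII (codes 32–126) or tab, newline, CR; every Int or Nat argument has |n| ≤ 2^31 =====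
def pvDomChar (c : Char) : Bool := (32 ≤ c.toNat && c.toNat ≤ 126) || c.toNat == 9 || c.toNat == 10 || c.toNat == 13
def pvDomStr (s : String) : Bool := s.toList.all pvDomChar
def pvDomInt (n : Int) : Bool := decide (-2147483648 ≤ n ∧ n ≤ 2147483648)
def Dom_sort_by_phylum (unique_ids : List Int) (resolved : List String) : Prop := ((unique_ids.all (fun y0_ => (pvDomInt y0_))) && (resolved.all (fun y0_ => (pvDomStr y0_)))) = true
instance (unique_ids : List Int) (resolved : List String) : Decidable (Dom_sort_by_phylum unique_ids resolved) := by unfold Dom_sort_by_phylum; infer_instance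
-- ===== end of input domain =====

-- B replaces A's single sort under a composite (phylum-rank, name) key by staged passes over a
-- phylum-grouped species table: classify each id once, then emit one name-sorted slice per
-- phylum group in display order (alternative decomposition, same cost). No argument is mutated.

-- ===== PORT A =====
-- SPECIES_METADATA maps each name to (phylum, GC%); the float GC% is never read by
-- sort_by_phylum/get_phylum, so it is dropped from the ported constant (name ↦ phylum).
def SPECIES_PHYLA : List (String × String) := [
  ("Escherichia coli K-12", "g-Proteobacteria"),
  ("Escherichia coli 536", "g-Proteobacteria"),
  ("Pseudomonas putida", "g-Proteobacteria"),
  ("Acinetobacter baumannii", "g-Proteobacteria"),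
  ("Vibrio cholerae", "g-Proteobacteria"),
  ("Rhodobacter sphaeroides", "a-Proteobacteria"),
  ("Rhodopseudomonas palustris", "a-Proteobacteria"),
  ("Campylobacter jejuni", "e-Proteobacteria"),
  ("Helicobacter pylori", "e-Proteobacteria"),
  ("Bacillus subtilis", "Firmicutes"),
  ("Staphylococcus aureus", "Firmicutes"),
  ("Lactobacillus acidophilus", "Firmicutes"),
  ("Listeria monocytogenes", "Firmicutes"),
  ("Enterococcus faecalis", "Firmicutes"),
  ("Clostridium acetobutylicum", "Firmicutes"),
  ("Mycobacterium tuberculosis", "Actinobacteria"),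
  ("Streptomyces coelicolor", "Actinobacteria"),
  ("Deinococcus radiodurans", "Deinococcota"),
  ("Thermus thermophilus", "Deinococcota"),
  ("Mycoplasma genitalium", "Tenericutes"),
  ("Borrelia burgdorferi", "Spirochaetes")]

def PHYLUM_ORDER : List String := [
  "g-Proteobacteria", "a-Proteobacteria", "e-Proteobacteria",
  "Firmicutes", "Actinobacteria", "Deinococcota",
  "Tenericutes", "Spirochaetes", "Other"]

-- the 'for k, (p, _) in SPECIES_METADATA.items(): if k.startswith(genus): return p' loop
def genusScan : List (String × String) → String → String
  | [], _ => "Other"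
  | (k, p) :: rest, genus =>
      if PySem.Str.startswith k genus then p else genusScan rest genus

-- get_phylum; 'name.split()[0]' is headD "" — Pre_ excludes the inputs on which the
-- selected name makes that subscript raise (split() == [] while " " in name)
def getPhylum (name : String) : String :=
  match PySem.Dict.get? (PySem.Dict.ofList SPECIES_PHYLA) name with
  | some p => p
  | none =>
    let genus := if PySem.Str.isIn " " name then (PySem.Str.split₀ name).headD "" else name
    genusScan SPECIES_PHYLA genus

-- 'resolved[gid] if gid < len(resolved) else f"Genome {gid}"'; pyGetD's "" default is
-- unreachable under Pre_ (which demands -len ≤ gid when gid < len)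
def nameOf (resolved : List String) (gid : Int) : String :=
  if gid < (resolved.length : Int) then PySem.List.pyGetD resolved gid ""
  else PySem.Str.join "" ["Genome ", PySem.Int.toStr gid]

def sort_by_phylum (unique_ids : List Int) (resolved : List String) : List (Int × String × String) :=
  let items := unique_ids.foldl (fun acc gid =>
      let nm := nameOf resolved gid
      acc ++ [(gid, nm, getPhylum nm)]) []
  PySem.List.sorted2 items
    (fun x => match PySem.List.index? PHYLUM_ORDER x.2.2 with
              | some k => (k : Int)
              | none => (PHYLUM_ORDER.length : Int))
    (fun x => x.2.1)

-- ===== PORT B =====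
-- B's table: the same metadata, but grouped by phylum, groups in display order (the trailing
-- "Other" group is the fallback); flattening it yields A's dict order exactly.
def PHYLA_TABLE : List (String × List String) := [
  ("g-Proteobacteria", ["Escherichia coli K-12", "Escherichia coli 536",
                        "Pseudomonas putida", "Acinetobacter baumannii", "Vibrio cholerae"]),
  ("a-Proteobacteria", ["Rhodobacter sphaeroides", "Rhodopseudomonas palustris"]),
  ("e-Proteobacteria", ["Campylobacter jejuni", "Helicobacter pylori"]),
  ("Firmicutes",       ["Bacillus subtilis", "Staphylococcus aureus", "Lactobacillus acidophilus",
                        "Listeria monocytogenes", "Enterococcus faecalis", "Clostridium acetobutylicum"]),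
  ("Actinobacteria",   ["Mycobacterium tuberculosis", "Streptomyces coelicolor"]),
  ("Deinococcota",     ["Deinococcus radiodurans", "Thermus thermophilus"]),
  ("Tenericutes",      ["Mycoplasma genitalium"]),
  ("Spirochaetes",     ["Borrelia burgdorferi"]),
  ("Other",            [])]

-- 'for ph, names in PHYLA_TABLE: if name in names: return ph'
def exactFind : List (String × List String) → String → Option String
  | [], _ => none
  | (ph, ns) :: rest, name => if name ∈ ns then some ph else exactFind rest name

-- 'for ph, names in PHYLA_TABLE: if any(k.startswith(genus) for k in names): return ph'
def prefixFind : List (String × List String) → String → Option String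
  | [], _ => none
  | (ph, ns) :: rest, genus =>
      if ns.any (fun k => PySem.Str.startswith k genus) then some ph else prefixFind rest genus

def phylum_of (name : String) : String :=
  match exactFind PHYLA_TABLE name with
  | some ph => ph
  | none =>
    let genus := if PySem.Str.isIn " " name then (PySem.Str.split₀ name).headD "" else name
    (prefixFind PHYLA_TABLE genus).getD "Other"

-- 'label(gid)'; the f-string is ported as list-level concatenation
def labelOf (resolved : List String) (gid : Int) : String :=
  if gid < (resolved.length : Int) then PySem.List.pyGetD resolved gid ""
  else String.ofList ("Genome ".toList ++ PySem.Int.toChars gid)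

def sort_by_phylum_alt (unique_ids : List Int) (resolved : List String) : List (Int × String × String) :=
  let named := unique_ids.map (fun gid => (gid, labelOf resolved gid))
  let triples := named.map (fun p => (p.1, p.2, phylum_of p.2))
  PHYLA_TABLE.foldl (fun out g =>
    out ++ PySem.List.sorted (triples.filter (fun t => t.2.2 == g.1)) (fun t => t.2.1)) []

-- ===== PRECONDITION & SPEC =====
-- a name is split-safe iff 'name.split()[0] if " " in name else name' cannot raise
def nameOk (s : String) : Prop := PySem.Str.isIn " " s = true → PySem.Str.split₀ s ≠ []

-- Pre_ excludes exactly the inputs on which the Python raises (B raises there too):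
-- an id below -len(resolved) (IndexError on resolved[gid]) and an in-range id whose
-- resolved name is whitespace containing " " (IndexError on name.split()[0]).
def Pre_sort_by_phylum (unique_ids : List Int) (resolved : List String) : Prop :=
  ∀ gid ∈ unique_ids, gid < (resolved.length : Int) →
    -(resolved.length : Int) ≤ gid ∧ nameOk (PySem.List.pyGetD resolved gid "")
instance (unique_ids : List Int) (resolved : List String) : Decidable (Pre_sort_by_phylum unique_ids resolved) := by
  unfold Pre_sort_by_phylum nameOk; infer_instance

def pvWitness_sort_by_phylum : List Int × List String :=
  ([2, 0, -1, 1], ["Bacillus subtilis", "Escherichia coli K-12"])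

def Spec_sort_by_phylum (unique_ids : List Int) (resolved : List String) (out : List (Int × String × String)) : Prop := out = sort_by_phylum_alt unique_ids resolved
instance (unique_ids : List Int) (resolved : List String) (out : List (Int × String × String)) : Decidable (Spec_sort_by_phylum unique_ids resolved out) := by unfold Spec_sort_by_phylum; infer_instance

-- ===== CLAIM (what is proved, stated in full; the proofs are below) =====
def Claim_equal_sort_by_phylum : Prop := ∀ (unique_ids : List Int) (resolved : List String), Dom_sort_by_phylum unique_ids resolved → Pre_sort_by_phylum unique_ids resolved → Spec_sort_by_phylum unique_ids resolved (sort_by_phylum unique_ids resolved)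

-- ===== LEMMAS AND PROOFS =====

-- ---- the two classification routines agree ----

-- flattening a grouped table into A's dict order
def flatTable (gs : List (String × List String)) : List (String × String) :=
  gs.flatMap (fun g => g.2.map (fun n => (n, g.1)))

lemma flat_table_eq : flatTable PHYLA_TABLE = SPECIES_PHYLA := by decide

-- first-match lookup over an association list (what Dict.get? does on nodup keys)
def firstVal : List (String × String) → String → Option String
  | [], _ => none
  | (k, p) :: rest, name => if k == name then some p else firstVal rest name

lemma ofList_species : PySem.Dict.ofList SPECIES_PHYLA = PySem.Dict.mk SPECIES_PHYLA := by decide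

lemma get?_mk_eq_firstVal (l : List (String × String)) (name : String) :
    (PySem.Dict.mk l).get? name = firstVal l name := by
  induction l with
  | nil => rfl
  | cons kv rest ih =>
      obtain ⟨k, p⟩ := kv
      rw [PySem.Dict.get?_mk_cons]
      simp [firstVal, ih]

lemma firstVal_group (ns : List String) (ph : String) (l : List (String × String)) (name : String) :
    firstVal (ns.map (fun n => (n, ph)) ++ l) name
      = if name ∈ ns then some ph else firstVal l name := by
  induction ns with
  | nil => simp
  | cons n ns ih =>
      by_cases h : n = name
      · simp [firstVal, h]
      · have : (n == name) = false := by simp [h]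
        simp [firstVal, this, ih, Ne.symm h]

lemma firstVal_flat (gs : List (String × List String)) (name : String) :
    firstVal (flatTable gs) name = exactFind gs name := by
  induction gs with
  | nil => rfl
  | cons g gs ih =>
      obtain ⟨ph, ns⟩ := g
      rw [show flatTable ((ph, ns) :: gs) = ns.map (fun n => (n, ph)) ++ flatTable gs from rfl,
          firstVal_group,
          show exactFind ((ph, ns) :: gs) name
            = (if name ∈ ns then some ph else exactFind gs name) from rfl]
      by_cases h : name ∈ ns
      · rw [if_pos h, if_pos h]
      · rw [if_neg h, if_neg h, ih]

lemma genusScan_group (ns : List String) (ph : String) (l : List (String × String)) (genus : String) :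
    genusScan (ns.map (fun n => (n, ph)) ++ l) genus
      = if ns.any (fun k => PySem.Str.startswith k genus) then ph else genusScan l genus := by
  induction ns with
  | nil => simp
  | cons n ns ih =>
      rw [List.map_cons, List.cons_append,
          show genusScan ((n, ph) :: (ns.map (fun n => (n, ph)) ++ l)) genus
            = (if PySem.Str.startswith n genus then ph
               else genusScan (ns.map (fun n => (n, ph)) ++ l) genus) from rfl,
          ih, List.any_cons, if_congr (iff_of_eq (Bool.or_eq_true _ _)) rfl rfl]
      by_cases h1 : PySem.Str.startswith n genus = true
      · rw [if_pos h1, if_pos (Or.inl h1)]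
      · by_cases h2 : ns.any (fun k => PySem.Str.startswith k genus) = true
        · rw [if_neg h1, if_pos h2, if_pos (Or.inr h2)]
        · rw [if_neg h1, if_neg h2, if_neg (by tauto)]

lemma genusScan_flat (gs : List (String × List String)) (genus : String) :
    genusScan (flatTable gs) genus = (prefixFind gs genus).getD "Other" := by
  induction gs with
  | nil => rfl
  | cons g gs ih =>
      obtain ⟨ph, ns⟩ := g
      rw [show flatTable ((ph, ns) :: gs) = ns.map (fun n => (n, ph)) ++ flatTable gs from rfl,
          genusScan_group,
          show prefixFind ((ph, ns) :: gs) genus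
            = (if ns.any (fun k => PySem.Str.startswith k genus) then some ph
               else prefixFind gs genus) from rfl]
      by_cases h : ns.any (fun k => PySem.Str.startswith k genus) = true
      · rw [if_pos h, if_pos h]; rfl
      · rw [if_neg h, if_neg h, ih]

lemma phylum_agree (name : String) : phylum_of name = getPhylum name := by
  unfold phylum_of getPhylum
  rw [ofList_species, get?_mk_eq_firstVal, ← flat_table_eq, firstVal_flat, ← genusScan_flat]

-- ---- every phylum either routine yields is listed in PHYLUM_ORDER ----

lemma exactFind_mem {gs : List (String × List String)} {name ph : String}
    (h : exactFind gs name = some ph) : ph ∈ gs.map Prod.fst := by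
  induction gs with
  | nil => simp [exactFind] at h
  | cons g gs ih =>
      obtain ⟨p, ns⟩ := g
      rw [show exactFind ((p, ns) :: gs) name
            = (if name ∈ ns then some p else exactFind gs name) from rfl] at h
      by_cases hm : name ∈ ns
      · rw [if_pos hm] at h; injection h with h; simp [h.symm]
      · rw [if_neg hm] at h; simp [ih h]

lemma prefixFind_mem {gs : List (String × List String)} {genus ph : String}
    (h : prefixFind gs genus = some ph) : ph ∈ gs.map Prod.fst := by
  induction gs with
  | nil => simp [prefixFind] at h
  | cons g gs ih =>
      obtain ⟨p, ns⟩ := g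
      rw [show prefixFind ((p, ns) :: gs) genus
            = (if ns.any (fun k => PySem.Str.startswith k genus) then some p
               else prefixFind gs genus) from rfl] at h
      by_cases hm : ns.any (fun k => PySem.Str.startswith k genus) = true
      · rw [if_pos hm] at h; injection h with h; simp [h.symm]
      · rw [if_neg hm] at h; simp [ih h]

lemma table_fsts : PHYLA_TABLE.map Prod.fst = PHYLUM_ORDER := by decide

lemma phylum_of_mem (name : String) : phylum_of name ∈ PHYLUM_ORDER := by
  cases he : exactFind PHYLA_TABLE name with
  | some ph =>
      have hv : phylum_of name = ph := by simp [phylum_of, he]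
      rw [hv, ← table_fsts]; exact exactFind_mem he
  | none =>
      cases hp : prefixFind PHYLA_TABLE
          (if PySem.Str.isIn " " name then (PySem.Str.split₀ name).headD "" else name) with
      | some ph =>
          have hv : phylum_of name = ph := by
            unfold phylum_of; rw [he]; dsimp only; rw [hp]; rfl
          rw [hv, ← table_fsts]; exact prefixFind_mem hp
      | none =>
          have hv : phylum_of name = "Other" := by
            unfold phylum_of; rw [he]; dsimp only; rw [hp]; rfl
          rw [hv]; decide

-- ---- A's sort, decomposed into per-rank slices ----

def tripleOf (resolved : List String) (gid : Int) : Int × String × String :=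
  let nm := nameOf resolved gid
  (gid, nm, getPhylum nm)

def rankOf (x : Int × String × String) : Nat :=
  match PySem.List.index? PHYLUM_ORDER x.2.2 with
  | some k => k
  | none => PHYLUM_ORDER.length

lemma rankOf_lt_of_mem {x : Int × String × String} (h : x.2.2 ∈ PHYLUM_ORDER) :
    rankOf x < PHYLUM_ORDER.length := by
  unfold rankOf
  cases hi : PySem.List.index? PHYLUM_ORDER x.2.2 with
  | none => exact absurd ((PySem.List.index?_eq_none_iff _ _).1 hi) (by simp [h])
  | some k =>
      obtain ⟨pre, suf, hx, hlen, -⟩ := (PySem.List.index?_eq_some_iff _ _ _).1 hi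
      show k < PHYLUM_ORDER.length
      rw [hx, ← hlen]; simp

-- ---- insertBy surgery ----

lemma insertBy_append_of_all_false {α : Type} (before : α → α → Bool) (x : α)
    (L R : List α) (h : ∀ y ∈ L, before x y = false) :
    PySem.List.insertBy before x (L ++ R) = L ++ PySem.List.insertBy before x R := by
  induction L with
  | nil => simp
  | cons a L ih =>
      have ha : before x a = false := h a (by simp)
      simp [PySem.List.insertBy, ha, ih (fun y hy => h y (by simp [hy]))]

lemma insertBy_append_of_all_true {α : Type} (before : α → α → Bool) (x : α)
    (M R : List α) (h : ∀ y ∈ R, before x y = true) :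
    PySem.List.insertBy before x (M ++ R) = PySem.List.insertBy before x M ++ R := by
  induction M with
  | nil =>
      cases R with
      | nil => simp
      | cons r rs => simp [PySem.List.insertBy, h r (by simp)]
  | cons a M ih =>
      by_cases ha : before x a = true
      · simp [PySem.List.insertBy, ha]
      · simp only [Bool.not_eq_true] at ha
        simp [PySem.List.insertBy, ha, ih]

lemma insertBy_congr {α : Type} (before before' : α → α → Bool) (x : α)
    (M : List α) (h : ∀ y ∈ M, before x y = before' x y) :
    PySem.List.insertBy before x M = PySem.List.insertBy before' x M := by
  induction M with
  | nil => rfl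
  | cons a M ih =>
      have ha := h a (by simp)
      by_cases hb : before x a = true
      · simp [PySem.List.insertBy, hb, ha ▸ hb]
      · simp only [Bool.not_eq_true] at hb
        simp [PySem.List.insertBy, hb, ha ▸ hb, ih (fun y hy => h y (by simp [hy]))]

-- the composite-key comparison A's sorted2 uses (rank cast to Int, then name)
def lt2 (x y : Int × String × String) : Bool :=
  decide ((rankOf x : Int) < (rankOf y : Int)) ||
    (!decide ((rankOf y : Int) < (rankOf x : Int)) && decide (x.2.1 < y.2.1))

def nameLt (x y : Int × String × String) : Bool := decide (x.2.1 < y.2.1)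

lemma lt2_of_rank_lt {x y : Int × String × String} (h : rankOf y < rankOf x) :
    lt2 x y = false := by
  have h1 : ¬ ((rankOf x : Int) < (rankOf y : Int)) := by exact_mod_cast Nat.not_lt.2 (le_of_lt h)
  have h2 : (rankOf y : Int) < (rankOf x : Int) := by exact_mod_cast h
  simp [lt2, h1, h2]

lemma lt2_of_rank_gt {x y : Int × String × String} (h : rankOf x < rankOf y) :
    lt2 x y = true := by
  have h1 : (rankOf x : Int) < (rankOf y : Int) := by exact_mod_cast h
  simp [lt2, h1]

lemma lt2_of_rank_eq {x y : Int × String × String} (h : rankOf y = rankOf x) :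
    lt2 x y = nameLt x y := by
  simp [lt2, nameLt, h]

lemma sorted2_eq_foldl (xs : List (Int × String × String)) :
    PySem.List.sorted2 xs (fun x => (rankOf x : Int)) (fun x => x.2.1)
      = xs.foldl (fun acc x => PySem.List.insertBy lt2 x acc) [] := rfl

lemma sorted_name_eq_foldl (xs : List (Int × String × String)) :
    PySem.List.sorted xs (fun x => x.2.1)
      = xs.foldl (fun acc x => PySem.List.insertBy nameLt x acc) [] :=
  PySem.List.sorted_eq_foldl_insertBy xs _

-- the bucket decomposition of the stable sort under the composite key
lemma bucket_sort (N : Nat) (xs : List (Int × String × String))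
    (h : ∀ x ∈ xs, rankOf x < N) :
    xs.foldl (fun acc x => PySem.List.insertBy lt2 x acc) []
      = (List.range N).flatMap
          (fun i => PySem.List.sorted (xs.filter (fun x => rankOf x == i)) (fun x => x.2.1)) := by
  induction xs using List.reverseRecOn with
  | nil => simp [PySem.List.sorted]
  | append_singleton xs x ih =>
      have hx : rankOf x < N := h x (by simp)
      have hxs : ∀ y ∈ xs, rankOf y < N := fun y hy => h y (by simp [hy])
      rw [List.foldl_append, List.foldl_cons, List.foldl_nil, ih hxs]
      have hN : N = rankOf x + 1 + (N - rankOf x - 1) := by omega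
      set i := rankOf x with hi
      set F : Nat → List (Int × String × String) :=
        fun j => PySem.List.sorted (xs.filter (fun y => rankOf y == j)) (fun y => y.2.1) with hF
      set F' : Nat → List (Int × String × String) :=
        fun j => PySem.List.sorted ((xs ++ [x]).filter (fun y => rankOf y == j)) (fun y => y.2.1) with hF'
      have memF : ∀ j y, y ∈ F j → rankOf y = j := by
        intro j y hy
        rw [hF] at hy
        simp only [PySem.List.mem_sorted, List.mem_filter, beq_iff_eq] at hy
        exact hy.2
      have hFF' : ∀ j, j ≠ i → F' j = F j := by
        intro j hj
        rw [hF, hF']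
        have hne : (rankOf x == j) = false := beq_eq_false_iff_ne.2 (hi ▸ (Ne.symm hj))
        simp [List.filter_append, hne]
      have hFi' : F' i = PySem.List.insertBy nameLt x (F i) := by
        rw [hF, hF']
        have heq : (rankOf x == i) = true := beq_iff_eq.2 hi.symm
        simp only [List.filter_append, List.filter_cons, List.filter_nil, heq, if_pos]
        rw [sorted_name_eq_foldl, sorted_name_eq_foldl, List.foldl_append]
        rfl
      rw [hN]
      simp only [List.range_add, List.range_succ, List.append_assoc, List.flatMap_append,
        List.flatMap_cons, List.flatMap_nil, List.flatMap_map]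
      have hL : (List.range i).flatMap F' = (List.range i).flatMap F :=
        List.flatMap_congr (fun j hj => hFF' j (by simp at hj; omega))
      have hR : (List.range (N - i - 1)).flatMap (fun t => F' (i + 1 + t))
              = (List.range (N - i - 1)).flatMap (fun t => F (i + 1 + t)) :=
        List.flatMap_congr (fun t _ => hFF' (i + 1 + t) (by omega))
      rw [hL, hR, hFi']
      simp only [List.nil_append]
      rw [insertBy_append_of_all_false lt2 x _ _ (by
        intro y hy
        obtain ⟨j, hj, hyj⟩ := List.mem_flatMap.1 hy
        have := memF j y hyj
        exact lt2_of_rank_lt (by simp at hj; omega))]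
      congr 1
      rw [insertBy_append_of_all_true lt2 x _ _ (by
        intro y hy
        obtain ⟨t, _, hyt⟩ := List.mem_flatMap.1 hy
        have := memF (i + 1 + t) y hyt
        exact lt2_of_rank_gt (by omega))]
      congr 1
      exact insertBy_congr lt2 nameLt x _ (fun y hy => lt2_of_rank_eq (memF i y hy))

-- ---- rank slices are phylum slices ----

-- over the 9 listed phyla, 'rank == i' is 'phylum == PHYLUM_ORDER[i]' (finite check)
lemma rank_beq_eq_phylum_beq : ∀ ph ∈ PHYLUM_ORDER, ∀ i ∈ List.range PHYLUM_ORDER.length,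
    ((match PySem.List.index? PHYLUM_ORDER ph with
      | some k => k
      | none => PHYLUM_ORDER.length) == i) = (ph == PHYLUM_ORDER.getD i "") := by decide

lemma range_map_getD : (List.range PHYLUM_ORDER.length).map (fun i => PHYLUM_ORDER.getD i "")
    = PHYLUM_ORDER := by decide

-- ---- the item lists coincide ----

lemma items_eq_map (unique_ids : List Int) (resolved : List String) :
    unique_ids.foldl (fun acc gid =>
        let nm := nameOf resolved gid
        acc ++ [(gid, nm, getPhylum nm)]) []
      = unique_ids.map (tripleOf resolved) := by
  show List.foldl (fun acc gid => acc ++ [tripleOf resolved gid]) [] unique_ids = _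
  rw [PySem.List.foldl_append_singleton_eq_map, List.nil_append]

lemma label_eq_name (resolved : List String) (gid : Int) :
    labelOf resolved gid = nameOf resolved gid := by
  unfold labelOf nameOf
  by_cases h : gid < (resolved.length : Int)
  · simp [h]
  · simp only [h, if_false]
    simp [PySem.Str.join, PySem.Chars.join, PySem.Int.toList_toStr, List.intercalate]

lemma triples_eq (unique_ids : List Int) (resolved : List String) :
    (unique_ids.map (fun gid => (gid, labelOf resolved gid))).map
        (fun p => (p.1, p.2, phylum_of p.2))
      = unique_ids.map (tripleOf resolved) := by
  rw [List.map_map]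
  exact List.map_congr_left (fun gid _ => by
    simp [Function.comp, tripleOf, label_eq_name, phylum_agree])

-- A's key function is rankOf cast to Int
lemma keyA_eq : (fun x : Int × String × String =>
      match PySem.List.index? PHYLUM_ORDER x.2.2 with
      | some k => (k : Int)
      | none => (PHYLUM_ORDER.length : Int))
    = fun x => (rankOf x : Int) := by
  funext x
  unfold rankOf
  cases PySem.List.index? PHYLUM_ORDER x.2.2 <;> rfl

-- ===== VERDICT (by name: the statement is the Claim_ definition above) =====
theorem sort_by_phylum_spec : Claim_equal_sort_by_phylum := by
  intro unique_ids resolved _ _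
  unfold Spec_sort_by_phylum sort_by_phylum sort_by_phylum_alt
  dsimp only
  rw [items_eq_map, keyA_eq, sorted2_eq_foldl, triples_eq]
  set items := unique_ids.map (tripleOf resolved) with hitems
  have hmem : ∀ x ∈ items, x.2.2 ∈ PHYLUM_ORDER := by
    intro x hx
    rw [hitems] at hx
    obtain ⟨gid, -, rfl⟩ := List.mem_map.1 hx
    show getPhylum (nameOf resolved gid) ∈ PHYLUM_ORDER
    rw [← phylum_agree]
    exact phylum_of_mem _
  have hb : ∀ x ∈ items, rankOf x < PHYLUM_ORDER.length :=
    fun x hx => rankOf_lt_of_mem (hmem x hx)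
  rw [bucket_sort PHYLUM_ORDER.length items hb,
    PySem.List.foldl_append_eq_flatMap, List.nil_append]
  have hfilter : ∀ i ∈ List.range PHYLUM_ORDER.length,
      items.filter (fun x => rankOf x == i)
        = items.filter (fun x => x.2.2 == PHYLUM_ORDER.getD i "") := by
    intro i hi
    exact List.filter_congr (fun x hx => by
      have := rank_beq_eq_phylum_beq x.2.2 (hmem x hx) i hi
      unfold rankOf
      exact this)
  calc (List.range PHYLUM_ORDER.length).flatMap
          (fun i => PySem.List.sorted (items.filter (fun x => rankOf x == i)) (fun x => x.2.1))
      = (List.range PHYLUM_ORDER.length).flatMap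
          (fun i => PySem.List.sorted (items.filter (fun x => x.2.2 == PHYLUM_ORDER.getD i ""))
            (fun x => x.2.1)) :=
        List.flatMap_congr (fun i hi => by rw [hfilter i hi])
    _ = PHYLUM_ORDER.flatMap
          (fun ph => PySem.List.sorted (items.filter (fun x => x.2.2 == ph)) (fun x => x.2.1)) := by
        conv_rhs => rw [← range_map_getD, List.flatMap_map]
    _ = PHYLA_TABLE.flatMap
          (fun g => PySem.List.sorted (items.filter (fun x => x.2.2 == g.1)) (fun x => x.2.1)) := by
        conv_lhs => rw [← table_fsts, List.flatMap_map]
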